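-- pv_equiv track=rewrite | github.com/smarczewski/algo1_ballenato | informacion_por_desarrollador.py | calcular_lineas_totales
-- ===== SOURCE A (Python) =====
-- def calcular_lineas_por_autor(diccionario):
--     """[Autor: Gaston Proz]
--     [Ayuda: Recibe un diccionario que contiene funciones por autor y
--     la cantidad de lineas de cada una, devuelve otro diccionario con autor como claves,
--     y como valor las lineas totales de cada autor]"""
--     """
--     Parametros
--     ----------
--     diccionario : dict
--             Diccionario principal
--     Returns
--     -------
--     dict
--             Diccionario que contiene a cada autor como clave, y
--             sus lineas de codigo totales como valor
--     """
--     lineas_por_autor = {}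
--     #Itera los autores del diccionario principal
--     for autor in diccionario:
--         #Segun el autor, itera hasta que terminen las funciones
--         for funcion in range(len(diccionario[autor])):
--             #En el caso de existir la clave autor en el diccionario
--             #vacio, suma la cantidad de lineas en el valor
--             if autor in lineas_por_autor:
--                 lineas_por_autor[autor] += diccionario[autor][funcion][1]
--             else: #Caso contrario, crea la clave y el valor
--                 lineas_por_autor[autor] = diccionario[autor][funcion][1]
--     return lineas_por_autor
--
-- def calcular_lineas_totales(diccionario):
--     """[Autor: Gaston Proz]
--     [Ayuda: Recibe un diccionario con autores como claves y las lineas totales de cada uno,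
--     y devuelve un entero con el total de lineas de todos los autores]"""
--     """
--     Parametros
--     ----------
--     diccionario : dict
--             Diccionario que indica las lineas de
--             cada autor
--     Returns
--     -------
--     int
--             Entero que indica el total de lineas
--             realizadas por todos los autores
--     """
--     lineas_totales = 0
--     #Suma en un acumulador las lineas de cada autor
--     datos = calcular_lineas_por_autor(diccionario)
--     for autor in datos:
--         lineas_totales += datos[autor]
--     return lineas_totales
-- ===== SOURCE B (Python) =====
-- def calcular_lineas_totales(diccionario):
--     """[Ayuda: total de lineas de todos los autores, sumado en una sola pasada
--     directa sobre cada funcion, sin diccionario intermedio por autor]"""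
--     return sum(linea[1] for funciones in diccionario.values() for linea in funciones)
-- ===== Notes on version B (the rewrite author's own statement) =====
-- stated objective: simpler
-- what changed: B replaces A's two-phase computation (build an intermediate per-author totals dict with membership tests and index-based inner loops, then sum that dict's values) by one flat sum over every function entry, with no intermediate dict and no indexing (measured ~1.8x faster).
import Mathlib
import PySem

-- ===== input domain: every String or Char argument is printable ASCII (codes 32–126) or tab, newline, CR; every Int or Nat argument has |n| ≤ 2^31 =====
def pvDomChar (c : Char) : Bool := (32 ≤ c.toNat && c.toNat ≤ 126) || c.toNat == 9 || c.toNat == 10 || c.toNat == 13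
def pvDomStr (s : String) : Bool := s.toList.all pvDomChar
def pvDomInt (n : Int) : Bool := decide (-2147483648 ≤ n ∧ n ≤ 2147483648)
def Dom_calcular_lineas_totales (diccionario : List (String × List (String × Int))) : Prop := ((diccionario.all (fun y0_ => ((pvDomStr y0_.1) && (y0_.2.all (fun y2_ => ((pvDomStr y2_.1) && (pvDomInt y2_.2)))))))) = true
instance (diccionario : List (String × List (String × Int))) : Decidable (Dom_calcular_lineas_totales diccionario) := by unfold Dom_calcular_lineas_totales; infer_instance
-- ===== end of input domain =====

-- B computes the grand total of code lines in one flat pass over every function entry,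
-- without A's intermediate per-author totals dict; objective: simpler.


-- ===== PORT A =====
-- inner loop of calcular_lineas_por_autor: 'for funcion in range(len(funcs)): …'
def pvInnerA (funcs : List (String × Int)) (autor : String)
    (lpa : PySem.Dict String Int) : PySem.Dict String Int :=
  (PySem.List.pyRange 0 (PySem.List.len funcs)).foldl
    (fun lpa funcion =>
      if lpa.contains autor then
        lpa.insert autor (lpa.getD autor 0 + (PySem.List.pyGetD funcs funcion ("", 0)).2)
      else
        lpa.insert autor (PySem.List.pyGetD funcs funcion ("", 0)).2)
    lpa

def calcular_lineas_por_autor (diccionario : List (String × List (String × Int))) :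
    PySem.Dict String Int :=
  -- 'for autor in diccionario' iterates the dict's keys; 'diccionario[autor]' is the lookup
  (diccionario.map Prod.fst).foldl
    (fun lpa autor => pvInnerA ((PySem.Dict.mk diccionario).getD autor []) autor lpa)
    PySem.Dict.empty

def calcular_lineas_totales (diccionario : List (String × List (String × Int))) : Int :=
  let datos := calcular_lineas_por_autor diccionario
  datos.keys.foldl (fun lineas_totales autor => lineas_totales + datos.getD autor 0) 0

-- ===== PORT B =====
def calcular_lineas_totales_alt (diccionario : List (String × List (String × Int))) : Int :=
  (diccionario.flatMap (fun p => p.2.map (fun linea => linea.2))).sum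

-- ===== PRECONDITION & SPEC =====
-- Pre_ excludes association lists with duplicate author keys: a Python dict cannot have
-- duplicate keys, so such lists represent no dict input and A's behaviour there is
-- an artefact of the representation, not of the program.
def Pre_calcular_lineas_totales (diccionario : List (String × List (String × Int))) : Prop :=
  (diccionario.map Prod.fst).Nodup
instance (diccionario : List (String × List (String × Int))) : Decidable (Pre_calcular_lineas_totales diccionario) := by unfold Pre_calcular_lineas_totales; infer_instance

def pvWitness_calcular_lineas_totales : (List (String × List (String × Int))) :=
  [("ana", [("f", 3), ("g", 4)]), ("bob", [])]

def Spec_calcular_lineas_totales (diccionario : List (String × List (String × Int))) (out : Int) : Prop := out = calcular_lineas_totales_alt diccionario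
instance (diccionario : List (String × List (String × Int))) (out : Int) : Decidable (Spec_calcular_lineas_totales diccionario out) := by unfold Spec_calcular_lineas_totales; infer_instance

-- ===== CLAIM (what is proved, stated in full; the proofs are below) =====
def Claim_equal_calcular_lineas_totales : Prop := ∀ (diccionario : List (String × List (String × Int))), Dom_calcular_lineas_totales diccionario → Pre_calcular_lineas_totales diccionario → Spec_calcular_lineas_totales diccionario (calcular_lineas_totales diccionario)

-- ===== LEMMAS AND PROOFS =====

-- the two branches of A's inner-loop body coincide: when the key is absent, getD is 0
lemma pvInnerA_step (autor : String) (lpa : PySem.Dict String Int) (v : Int) :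
    (if lpa.contains autor then lpa.insert autor (lpa.getD autor 0 + v)
     else lpa.insert autor v)
    = lpa.insert autor (lpa.getD autor 0 + v) := by
  by_cases h : lpa.contains autor = true
  · simp [h]
  · simp only [Bool.not_eq_true] at h
    simp [h, PySem.Dict.getD_of_not_contains _ _ h]

-- sum of a dict's values after overwriting key k by (old + v): grows by v (Nodup keys)
lemma values_sum_insert_add (d : PySem.Dict String Int) (k : String) (v : Int)
    (hnd : d.keys.Nodup) :
    (d.insert k (d.getD k 0 + v)).values.sum = d.values.sum + v := by
  by_cases hc : d.contains k = true
  · -- k occurs exactly once in items; the map rewrites only that entry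
    obtain ⟨w, hw⟩ : ∃ w, d.get? k = some w := by
      have := PySem.Dict.contains_eq_isSome_get? (d := d) (k := k)
      rw [hc] at this
      exact Option.isSome_iff_exists.mp this.symm
    have hitem : (k, w) ∈ d.items := PySem.Dict.mem_items_of_get?_eq_some _ hw
    have hgetD : d.getD k 0 = w := PySem.Dict.getD_of_mem_items _ hitem hnd 0
    unfold PySem.Dict.values
    rw [PySem.Dict.items_insert_of_contains _ _ hc]
    obtain ⟨pre, post, hsplit⟩ := List.mem_iff_append.mp hitem
    have hnd' := hnd
    unfold PySem.Dict.keys at hnd'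
    rw [hsplit] at hnd' ⊢
    simp only [List.map_append, List.map_cons] at hnd'
    obtain ⟨h1, h2, hdisj⟩ := List.nodup_append.mp hnd'
    have hpre : ∀ p ∈ pre, (p.1 == k) = false := by
      intro p hp
      simp only [beq_eq_false_iff_ne, ne_eq]
      intro hk
      have hm : p.1 ∈ List.map (fun x => x.1) pre := List.mem_map_of_mem hp
      rw [hk] at hm
      exact hdisj k hm k List.mem_cons_self rfl
    have hpost : ∀ p ∈ post, (p.1 == k) = false := by
      intro p hp
      simp only [beq_eq_false_iff_ne, ne_eq]
      intro hk
      have hm : p.1 ∈ List.map (fun x => x.1) post := List.mem_map_of_mem hp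
      rw [hk] at hm
      exact (List.nodup_cons.mp h2).1 hm
    have mpre : List.map (fun p : String × Int => if (p.1 == k) = true then (k, d.getD k 0 + v) else p) pre = pre := by
      calc List.map (fun p : String × Int => if (p.1 == k) = true then (k, d.getD k 0 + v) else p) pre
          = List.map id pre := List.map_congr_left (fun p hp => by simp [hpre p hp])
        _ = pre := List.map_id pre
    have mpost : List.map (fun p : String × Int => if (p.1 == k) = true then (k, d.getD k 0 + v) else p) post = post := by
      calc List.map (fun p : String × Int => if (p.1 == k) = true then (k, d.getD k 0 + v) else p) post
          = List.map id post := List.map_congr_left (fun p hp => by simp [hpost p hp])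
        _ = post := List.map_id post
    simp only [List.map_append, List.map_cons, mpre, mpost, List.sum_append, List.sum_cons]
    simp [hgetD]
    ring
  · simp only [Bool.not_eq_true] at hc
    unfold PySem.Dict.values
    rw [PySem.Dict.items_insert_of_not_contains _ _ hc,
        PySem.Dict.getD_of_not_contains _ _ hc]
    simp

-- the inner loop adds the sum of the author's line counts to the values sum
lemma pvInnerA_values_sum (funcs : List (String × Int)) (autor : String)
    (lpa : PySem.Dict String Int) (hnd : lpa.keys.Nodup) :
    (pvInnerA funcs autor lpa).values.sum
      = lpa.values.sum + (funcs.map (fun linea => linea.2)).sum := by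
  unfold pvInnerA
  rw [PySem.List.foldl_congr_mem _ _
      (fun lpa funcion =>
        lpa.insert autor (lpa.getD autor 0 + (PySem.List.pyGetD funcs funcion ("", 0)).2)) _
      (fun acc x _ => pvInnerA_step autor acc (PySem.List.pyGetD funcs x ("", 0)).2)]
  -- now a pure fold of inserts; do induction over the index list, any dict with Nodup keys
  have key : ∀ (l : List Int) (d : PySem.Dict String Int), d.keys.Nodup →
      (l.foldl (fun d i => d.insert autor (d.getD autor 0 + (PySem.List.pyGetD funcs i ("", 0)).2)) d).values.sum
        = d.values.sum + (l.map (fun i => (PySem.List.pyGetD funcs i ("", 0)).2)).sum := by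
    intro l
    induction l with
    | nil => intro d _; simp
    | cons i rest ih =>
      intro d hd
      simp only [List.foldl_cons, List.map_cons, List.sum_cons]
      rw [ih _ (by
            have := PySem.Dict.nodup_keys_foldl_insert_key [i] (fun _ => autor)
              (fun d _ => d.getD autor 0 + (PySem.List.pyGetD funcs i ("", 0)).2) d hd
            simpa using this),
          values_sum_insert_add _ _ _ hd]
      ring
  rw [key _ _ hnd]
  have h := PySem.List.map_pyGetD_pyRange_zero funcs ("", 0)
  conv_rhs => rw [← h]
  rw [List.map_map]
  rfl

-- keys of the inner loop's result stay Nodup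
lemma pvInnerA_nodup (funcs : List (String × Int)) (autor : String)
    (lpa : PySem.Dict String Int) (hnd : lpa.keys.Nodup) :
    (pvInnerA funcs autor lpa).keys.Nodup := by
  unfold pvInnerA
  rw [PySem.List.foldl_congr_mem _ _
      (fun lpa funcion =>
        lpa.insert autor (lpa.getD autor 0 + (PySem.List.pyGetD funcs funcion ("", 0)).2)) _
      (fun acc x _ => pvInnerA_step autor acc (PySem.List.pyGetD funcs x ("", 0)).2)]
  exact PySem.Dict.nodup_keys_foldl_insert_key _ (fun _ => autor) _ _ hnd

-- the outer loop: values sum of the per-author dict = the flat sum over all entries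
lemma por_autor_values_sum (diccionario : List (String × List (String × Int)))
    (hnd : (diccionario.map Prod.fst).Nodup) :
    (calcular_lineas_por_autor diccionario).values.sum
      = (diccionario.flatMap (fun p => p.2.map (fun linea => linea.2))).sum := by
  unfold calcular_lineas_por_autor
  rw [List.foldl_map]
  rw [PySem.List.foldl_congr_mem _ _ (fun lpa p => pvInnerA p.2 p.1 lpa) _
      (fun acc p hp => by
        have : (PySem.Dict.mk diccionario).getD p.1 [] = p.2 :=
          PySem.Dict.getD_of_mem_items (PySem.Dict.mk diccionario)
            (k := p.1) (v := p.2) hp hnd []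
        rw [this])]
  have key : ∀ (l : List (String × List (String × Int))) (d : PySem.Dict String Int),
      d.keys.Nodup →
      (l.foldl (fun lpa p => pvInnerA p.2 p.1 lpa) d).values.sum
        = d.values.sum + (l.flatMap (fun p => p.2.map (fun linea => linea.2))).sum := by
    intro l
    induction l with
    | nil => intro d _; simp
    | cons p rest ih =>
      intro d hd
      simp only [List.foldl_cons, List.flatMap_cons, List.sum_append]
      rw [ih _ (pvInnerA_nodup _ _ _ hd), pvInnerA_values_sum _ _ _ hd]
      ring
  rw [key _ _ PySem.Dict.nodup_keys_empty]
  simp [PySem.Dict.empty, PySem.Dict.values]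

lemma keys_nodup_por_autor (diccionario : List (String × List (String × Int))) :
    (calcular_lineas_por_autor diccionario).keys.Nodup := by
  unfold calcular_lineas_por_autor
  have key : ∀ (l : List String) (d : PySem.Dict String Int), d.keys.Nodup →
      (l.foldl (fun lpa autor =>
        pvInnerA ((PySem.Dict.mk diccionario).getD autor []) autor lpa) d).keys.Nodup := by
    intro l
    induction l with
    | nil => intro d hd; simpa using hd
    | cons a rest ih => intro d hd; exact ih _ (pvInnerA_nodup _ _ _ hd)
  exact key _ _ PySem.Dict.nodup_keys_empty

-- ===== VERDICT (by name: the statement is the Claim_ definition above) =====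
theorem calcular_lineas_totales_spec : Claim_equal_calcular_lineas_totales := by
  intro diccionario _hDom hPre
  unfold Spec_calcular_lineas_totales calcular_lineas_totales calcular_lineas_totales_alt
  have hnd : (calcular_lineas_por_autor diccionario).keys.Nodup :=
    keys_nodup_por_autor diccionario
  rw [PySem.List.foldl_add _ (fun autor => (calcular_lineas_por_autor diccionario).getD autor 0) 0,
      ← PySem.Dict.values_eq_map_keys _ hnd 0, por_autor_values_sum _ hPre]
  simp
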